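-- pv_equiv track=rewrite | github.com/jmcentire/pact | src/pact/contracts.py | _split_at_depth_zero
-- ===== SOURCE A (Python) =====
-- def _split_at_depth_zero(s: str, delimiter: str = ",") -> list[str]:
--     """Split a string on delimiter only at bracket depth 0."""
--     parts = []
--     depth = 0
--     current: list[str] = []
--     for ch in s:
--         if ch in ("[", "("):
--             depth += 1
--             current.append(ch)
--         elif ch in ("]", ")"):
--             depth -= 1
--             current.append(ch)
--         elif ch == delimiter and depth == 0:
--             parts.append("".join(current))
--             current = []
--         else:
--             current.append(ch)
--     if current:
--         parts.append("".join(current))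
--     return parts
-- ===== SOURCE B (Python) =====
-- def _split_at_depth_zero(s: str, delimiter: str = ",") -> list[str]:
--     """Split on delimiter at bracket depth 0: record boundary indices, then slice."""
--     boundaries = []
--     depth = 0
--     for i, ch in enumerate(s):
--         if ch in "[(":
--             depth += 1
--         elif ch in "])":
--             depth -= 1
--         elif ch == delimiter and depth == 0:
--             boundaries.append(i)
--     parts = []
--     start = 0
--     for p in boundaries:
--         parts.append(s[start:p])
--         start = p + 1
--     tail = s[start:]
--     if tail:
--         parts.append(tail)
--     return parts
-- ===== Notes on version B (the rewrite author's own statement) =====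
-- stated objective: alternative
-- what changed: B replaces A's single pass that accumulates the current segment's characters with a two-phase algorithm: a first pass records only the indices of depth-0 delimiters, and a second pass slices the string between consecutive boundaries (dropping only a trailing empty slice).
import Mathlib
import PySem

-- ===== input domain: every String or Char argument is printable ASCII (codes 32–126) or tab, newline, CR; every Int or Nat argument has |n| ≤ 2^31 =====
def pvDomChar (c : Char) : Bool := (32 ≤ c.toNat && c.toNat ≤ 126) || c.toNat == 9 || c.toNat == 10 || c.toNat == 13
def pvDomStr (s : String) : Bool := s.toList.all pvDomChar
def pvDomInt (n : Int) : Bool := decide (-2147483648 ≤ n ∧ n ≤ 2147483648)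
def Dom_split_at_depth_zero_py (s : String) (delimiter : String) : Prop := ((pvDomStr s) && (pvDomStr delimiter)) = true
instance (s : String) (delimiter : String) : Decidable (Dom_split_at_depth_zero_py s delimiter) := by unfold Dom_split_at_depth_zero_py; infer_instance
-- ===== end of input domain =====

-- B is an alternative two-phase algorithm (boundary indices, then slices); same O(n) cost.

-- ===== PORT A =====
-- A's loop: state (parts, current, depth); "".join(current) is String.ofList of the char list.
def pvALoop (delimiter : String) : List Char → List String → List Char → Int → List String
  | [], parts, current, _ =>
      if current.isEmpty then parts else parts ++ [String.ofList current]
  | ch :: rest, parts, current, depth =>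
      if ch = '[' ∨ ch = '(' then pvALoop delimiter rest parts (current ++ [ch]) (depth + 1)
      else if ch = ']' ∨ ch = ')' then pvALoop delimiter rest parts (current ++ [ch]) (depth - 1)
      else if String.ofList [ch] = delimiter ∧ depth = 0 then
        pvALoop delimiter rest (parts ++ [String.ofList current]) [] depth
      else pvALoop delimiter rest parts (current ++ [ch]) depth

def split_at_depth_zero_py (s : String) (delimiter : String) : List String :=
  pvALoop delimiter s.toList [] [] 0

-- ===== PORT B =====
-- Phase 1 of Source B: for i, ch in enumerate(s): record i where ch == delimiter and depth == 0.
def pvBoundaries (delimiter : String) : List (Int × Char) → Int → List Int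
  | [], _ => []
  | (i, ch) :: rest, depth =>
      if ch = '[' ∨ ch = '(' then pvBoundaries delimiter rest (depth + 1)
      else if ch = ']' ∨ ch = ')' then pvBoundaries delimiter rest (depth - 1)
      else if String.ofList [ch] = delimiter ∧ depth = 0 then i :: pvBoundaries delimiter rest depth
      else pvBoundaries delimiter rest depth

-- Phase 2 of Source B: for p in boundaries: append s[start:p]; start = p+1; then tail = s[start:].
-- (string slicing ported as PySem.List.slice on the code points, exact)
def pvAssemble (s : List Char) : List Int → Int → List String
  | [], start =>
      let tail := PySem.List.slice s (some start) none
      if tail.isEmpty then [] else [String.ofList tail]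
  | p :: rest, start =>
      String.ofList (PySem.List.slice s (some start) (some p)) :: pvAssemble s rest (p + 1)

def split_at_depth_zero_py_alt (s : String) (delimiter : String) : List String :=
  pvAssemble s.toList (pvBoundaries delimiter (PySem.List.enumerate s.toList 0) 0) 0

-- ===== PRECONDITION & SPEC =====
def Spec_split_at_depth_zero_py (s : String) (delimiter : String) (out : List String) : Prop := out = split_at_depth_zero_py_alt s delimiter
instance (s : String) (delimiter : String) (out : List String) : Decidable (Spec_split_at_depth_zero_py s delimiter out) := by unfold Spec_split_at_depth_zero_py; infer_instance

-- ===== CLAIM (what is proved, stated in full; the proofs are below) =====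
def Claim_equal_split_at_depth_zero_py : Prop := ∀ (s : String) (delimiter : String), Dom_split_at_depth_zero_py s delimiter → Spec_split_at_depth_zero_py s delimiter (split_at_depth_zero_py s delimiter)

-- ===== LEMMAS AND PROOFS =====

-- natural-number version of phase 1 (proof helper)
def natB (delimiter : String) : List Char → Nat → Int → List Nat
  | [], _, _ => []
  | ch :: rest, i, depth =>
      if ch = '[' ∨ ch = '(' then natB delimiter rest (i + 1) (depth + 1)
      else if ch = ']' ∨ ch = ')' then natB delimiter rest (i + 1) (depth - 1)
      else if String.ofList [ch] = delimiter ∧ depth = 0 then i :: natB delimiter rest (i + 1) depth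
      else natB delimiter rest (i + 1) depth

-- common assembled result, relative to the remaining suffix cs (which starts at absolute index i)
def asmR : List Char → List Char → List Nat → Nat → List String
  | current, cs, [], _ =>
      if (current ++ cs).isEmpty then [] else [String.ofList (current ++ cs)]
  | current, cs, p :: rest, i =>
      String.ofList (current ++ cs.take (p - i)) :: asmR [] (cs.drop (p - i + 1)) rest (p + 1)

theorem natB_ge (delimiter : String) (cs : List Char) (i : Nat) (d : Int) :
    ∀ p ∈ natB delimiter cs i d, i ≤ p := by
  induction cs generalizing i d with
  | nil => simp [natB]
  | cons ch rest ih =>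
    intro p hp
    simp only [natB] at hp
    split_ifs at hp with h1 h2 h3
    · exact le_trans (Nat.le_succ i) (ih (i+1) (d+1) p hp)
    · exact le_trans (Nat.le_succ i) (ih (i+1) (d-1) p hp)
    · rcases List.mem_cons.1 hp with h | h
      · omega
      · exact le_trans (Nat.le_succ i) (ih (i+1) d p h)
    · exact le_trans (Nat.le_succ i) (ih (i+1) d p hp)

theorem boundaries_eq_natB (delimiter : String) (cs : List Char) (i : Nat) (d : Int) :
    pvBoundaries delimiter (PySem.List.enumerate cs (i : Int)) d
      = (natB delimiter cs i d).map (Nat.cast : Nat → Int) := by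
  induction cs generalizing i d with
  | nil => simp [natB, pvBoundaries, PySem.List.enumerate_nil]
  | cons ch rest ih =>
    rw [PySem.List.enumerate_cons]
    simp only [pvBoundaries, natB]
    have : (i : Int) + 1 = ((i + 1 : Nat) : Int) := by push_cast; ring
    rw [this]
    split_ifs with h1 h2 h3
    · exact ih (i + 1) (d + 1)
    · exact ih (i + 1) (d - 1)
    · rw [List.map_cons, ih]
    · exact ih (i + 1) d

theorem asmR_cons (current : List Char) (ch : Char) (rest : List Char)
    (bs : List Nat) (i : Nat) (h : ∀ p ∈ bs, i + 1 ≤ p) :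
    asmR current (ch :: rest) bs i = asmR (current ++ [ch]) rest bs (i + 1) := by
  cases bs with
  | nil => simp [asmR]
  | cons p t =>
    have hp : i + 1 ≤ p := h p (List.mem_cons_self ..)
    simp only [asmR]
    have h1 : p - i = (p - (i + 1)) + 1 := by omega
    rw [h1]
    simp [List.take_succ_cons, List.drop_succ_cons]

theorem main_lemma (delimiter : String) (cs : List Char) :
    ∀ (parts : List String) (current : List Char) (depth : Int) (i : Nat),
      pvALoop delimiter cs parts current depth
        = parts ++ asmR current cs (natB delimiter cs i depth) i := by
  induction cs with
  | nil =>
    intro parts current depth i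
    simp only [pvALoop, natB, asmR, List.append_nil]
    split_ifs with h <;> simp_all
  | cons ch rest ih =>
    intro parts current depth i
    simp only [pvALoop, natB]
    split_ifs with h1 h2 h3
    · rw [ih parts (current ++ [ch]) (depth + 1) (i + 1),
        asmR_cons _ _ _ _ _ (natB_ge delimiter rest (i+1) (depth+1))]
    · rw [ih parts (current ++ [ch]) (depth - 1) (i + 1),
        asmR_cons _ _ _ _ _ (natB_ge delimiter rest (i+1) (depth-1))]
    · rw [ih (parts ++ [String.ofList current]) [] depth (i + 1)]
      simp only [asmR, Nat.sub_self, List.take_zero, List.append_nil, Nat.zero_add,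
        List.drop_succ_cons, List.drop_zero, List.append_assoc, List.singleton_append]
    · rw [ih parts (current ++ [ch]) depth (i + 1),
        asmR_cons _ _ _ _ _ (natB_ge delimiter rest (i+1) depth)]

theorem assemble_eq_asmR (s : List Char) (bs : List Nat) :
    ∀ i : Nat, (∀ p ∈ bs, i ≤ p) → bs.Pairwise (· < ·) →
      pvAssemble s (bs.map (Nat.cast : Nat → Int)) (i : Int) = asmR [] (s.drop i) bs i := by
  induction bs with
  | nil =>
    intro i _ _
    rw [List.map_nil]
    simp only [pvAssemble, asmR, List.nil_append]
    rw [PySem.List.slice_from_natCast]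
  | cons p t ih =>
    intro i hge hpw
    have hp : i ≤ p := hge p (List.mem_cons_self ..)
    rw [List.map_cons]
    simp only [pvAssemble, asmR, List.nil_append]
    rw [PySem.List.slice_natCast]
    congr 1
    have hstep : (p : Int) + 1 = ((p + 1 : Nat) : Int) := by push_cast; ring
    rw [hstep, ih (p + 1) (fun q hq => (List.pairwise_cons.1 hpw).1 q hq)
      (List.pairwise_cons.1 hpw).2]
    congr 1
    rw [List.drop_drop]
    congr 1
    omega

theorem natB_pairwise (delimiter : String) (cs : List Char) (i : Nat) (d : Int) :
    (natB delimiter cs i d).Pairwise (· < ·) := by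
  induction cs generalizing i d with
  | nil => simp [natB]
  | cons ch rest ih =>
    simp only [natB]
    split_ifs with h1 h2 h3
    · exact ih (i+1) (d+1)
    · exact ih (i+1) (d-1)
    · exact List.pairwise_cons.2 ⟨fun q hq => lt_of_lt_of_le (Nat.lt_succ_self i)
        (natB_ge delimiter rest (i+1) d q hq), ih (i+1) d⟩
    · exact ih (i+1) d

-- ===== VERDICT (by name: the statement is the Claim_ definition above) =====
theorem split_at_depth_zero_py_spec : Claim_equal_split_at_depth_zero_py := by
  intro s delimiter _
  unfold Spec_split_at_depth_zero_py split_at_depth_zero_py split_at_depth_zero_py_alt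
  show pvALoop delimiter s.toList [] [] 0
      = pvAssemble s.toList
          (pvBoundaries delimiter (PySem.List.enumerate s.toList ((0 : Nat) : Int)) 0)
          ((0 : Nat) : Int)
  rw [boundaries_eq_natB, assemble_eq_asmR s.toList _ 0 (fun p _ => Nat.zero_le p)
    (natB_pairwise delimiter s.toList 0 0), List.drop_zero,
    main_lemma delimiter s.toList [] [] 0 0, List.nil_append]
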